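-- pv_equiv track=rewrite | github.com/pardeep729/advent_of_code | Day 4/Part 1/xmas_wordsearcher.py | rotate_grid_45
-- ===== SOURCE A (Python) =====
-- def rotate_grid_45(grid, flip=True):
--     """
--     Rotate a grid of characters 45 degrees.
--     """
--
--     # Convert input to proper grid format (if single strings per row)
--     grid = [list(row[0]) for row in grid]
--
--     rows = len(grid)
--     cols = len(grid[0])
--
--     # Determine the range of keys based on `flip`
--     if flip:
--         # For i + j, keys range from 0 to rows + cols - 2
--         diagonals = [[] for _ in range(rows + cols - 1)]
--         for i in range(rows):
--             for j in range(cols):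
--                 key = i + j
--                 diagonals[key].append(grid[i][j])
--     else:
--         # For i - j, keys range from -(cols - 1) to (rows - 1)
--         diagonals = {}
--         for i in range(rows):
--             for j in range(cols):
--                 key = i - j
--                 if key not in diagonals:
--                     diagonals[key] = []
--                 diagonals[key].append(grid[i][j])
--         diagonals = [diagonals[key] for key in sorted(diagonals.keys())]
--
--     # Convert diagonals into strings
--     rotated_grid = ["".join(diag) for diag in diagonals]
--
--     return rotated_grid
-- ===== SOURCE B (Python) =====
-- def rotate_grid_45(grid, flip=True):
--     """
--     Rotate a grid of characters 45 degrees.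
--     """
--     # Same preprocessing as before: each row is its first string, split into chars
--     grid = [list(row[0]) for row in grid]
--
--     rows = len(grid)
--     cols = len(grid[0])
--
--     rotated_grid = []
--     if flip:
--         # anti-diagonals i + j = s, built directly, increasing i
--         for s in range(rows + cols - 1):
--             lo = max(0, s - cols + 1)
--             hi = min(s, rows - 1)
--             rotated_grid.append("".join(grid[i][s - i] for i in range(lo, hi + 1)))
--     else:
--         # diagonals i - j = k, from the most negative key upward, increasing i
--         for k in range(-(cols - 1), rows):
--             lo = max(0, k)
--             hi = min(rows - 1, k + cols - 1)
--             rotated_grid.append("".join(grid[i][i - k] for i in range(lo, hi + 1)))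
--     return rotated_grid
-- ===== Notes on version B (the rewrite author's own statement) =====
-- stated objective: alternative
-- what changed: Instead of scattering every cell with two nested loops into buckets keyed by i+j (list of lists) or i-j (dict, then sorted keys), B loops directly over the output diagonals and builds each one in a single pass with a closed-form index range, with no buckets, no dict and no sort.
-- outside the precondition, e.g. on rotate_grid_45([[''], ['a']], False): A returns [], B returns ['']
import Mathlib
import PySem

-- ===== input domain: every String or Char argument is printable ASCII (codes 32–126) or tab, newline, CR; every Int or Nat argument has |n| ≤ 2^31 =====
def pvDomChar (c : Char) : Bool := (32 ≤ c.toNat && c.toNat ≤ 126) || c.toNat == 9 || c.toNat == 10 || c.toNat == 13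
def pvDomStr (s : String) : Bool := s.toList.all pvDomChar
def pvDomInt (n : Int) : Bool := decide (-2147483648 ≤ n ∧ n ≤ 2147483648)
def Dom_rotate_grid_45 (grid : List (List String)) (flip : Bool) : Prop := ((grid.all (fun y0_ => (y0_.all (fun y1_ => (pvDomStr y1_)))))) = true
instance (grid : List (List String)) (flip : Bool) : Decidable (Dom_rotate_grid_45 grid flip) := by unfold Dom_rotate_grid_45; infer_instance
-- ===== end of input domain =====

-- B replaces A's bucket-scatter (nested loops into an i+j-indexed list / an i-j-keyed dict plus a
-- key sort) by a direct per-diagonal gather with closed-form index ranges: an alternative algorithm.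


-- ===== PORT A =====
-- Transliteration of A. row[0] / grid[0] / grid[i][j] raise IndexError where out of range; those
-- inputs are excluded by Pre_ below, and the port uses a default there ("", [], ' ') — exact on Pre_.
def rotate_grid_45 (grid : List (List String)) (flip : Bool) : List String :=
  -- grid = [list(row[0]) for row in grid]
  let g : List (List Char) := grid.map (fun row => ((PySem.List.pyGet? row 0).getD "").toList)
  let rows : Nat := g.length
  -- cols = len(grid[0])
  let cols : Nat := ((PySem.List.pyGet? g 0).getD []).length
  let diagonals : List (List Char) :=
    if flip then
      -- diagonals = [[] for _ in range(rows+cols-1)]; diagonals[i+j].append(grid[i][j])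
      (List.range rows).foldl (fun d (i : Nat) =>
        (List.range cols).foldl (fun d (j : Nat) =>
          d.set (i + j) (d.getD (i + j) [] ++ [(g.getD i []).getD j ' '])) d)
        (List.replicate (rows + cols - 1) [])
    else
      -- diagonals = {}; if key not in diagonals: diagonals[key] = []; diagonals[key].append(...)
      let dd : PySem.Dict Int (List Char) :=
        (List.range rows).foldl (fun d (i : Nat) =>
          (List.range cols).foldl (fun d (j : Nat) =>
            let key : Int := (i : Int) - (j : Int)
            let d := if d.contains key then d else d.insert key []
            d.modify key [] (fun l => l ++ [(g.getD i []).getD j ' '])) d)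
          PySem.Dict.empty
      -- [diagonals[key] for key in sorted(diagonals.keys())]
      (PySem.List.sorted dd.keys (fun x => x) false).map (fun k => dd.getD k [])
  diagonals.map (fun diag => String.ofList diag)

-- ===== PORT B =====
-- Transliteration of B (Source B). range(lo, hi+1) over non-negative ints is List.range' lo (hi+1-lo);
-- max/min on ints become Int max/min with .toNat where the value is used as an index (exact on Pre_).
def rotate_grid_45_alt (grid : List (List String)) (flip : Bool) : List String :=
  let g : List (List Char) := grid.map (fun row => ((PySem.List.pyGet? row 0).getD "").toList)
  let rows : Nat := g.length
  let cols : Nat := ((PySem.List.pyGet? g 0).getD []).length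
  if flip then
    -- for s in range(rows+cols-1): join(grid[i][s-i] for i in range(max(0,s-cols+1), min(s,rows-1)+1))
    (List.range (rows + cols - 1)).map (fun s =>
      let lo : Nat := s + 1 - cols       -- max(0, s - cols + 1) in truncated Nat arithmetic
      let hi : Nat := min s (rows - 1)
      String.ofList ((List.range' lo (hi + 1 - lo)).map (fun i => (g.getD i []).getD (s - i) ' ')))
  else
    -- for k in range(-(cols-1), rows): join(grid[i][i-k] for i in range(max(0,k), min(rows-1,k+cols-1)+1))
    (PySem.List.pyRange (-((cols : Int) - 1)) (rows : Int) 1).map (fun k =>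
      let lo : Nat := (max 0 k).toNat
      let hi : Nat := (min ((rows : Int) - 1) (k + (cols : Int) - 1)).toNat
      String.ofList ((List.range' lo (hi + 1 - lo)).map (fun i => (g.getD i []).getD ((i : Int) - k).toNat ' ')))

-- ===== PRECONDITION & SPEC =====
-- Pre_ excludes the inputs where A raises IndexError (empty grid, an empty row, a row whose first
-- string is shorter than the first row's), and the zero-column grids with flip=False and ≥ 2 rows:
-- there the grid has no cells and the number of empty diagonals to return is anybody's choice — A's
-- own two branches disagree about it ([] for flip=False but rows-1 empty strings for flip=True), so
-- either convention is defensible and B keeps its uniform rows+cols-1 count.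
def Pre_rotate_grid_45 (grid : List (List String)) (flip : Bool) : Prop :=
  grid ≠ [] ∧ (∀ row ∈ grid, row ≠ []) ∧
  (∀ row ∈ grid, ((grid.headD []).headD "").toList.length ≤ (row.headD "").toList.length) ∧
  (flip = false → 1 ≤ ((grid.headD []).headD "").toList.length ∨ grid.length ≤ 1)

instance (grid : List (List String)) (flip : Bool) : Decidable (Pre_rotate_grid_45 grid flip) := by
  unfold Pre_rotate_grid_45; infer_instance

def pvWitness_rotate_grid_45 : List (List String) × Bool := ([["abc"], ["def"]], false)

def Spec_rotate_grid_45 (grid : List (List String)) (flip : Bool) (out : List String) : Prop := out = rotate_grid_45_alt grid flip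
instance (grid : List (List String)) (flip : Bool) (out : List String) : Decidable (Spec_rotate_grid_45 grid flip out) := by unfold Spec_rotate_grid_45; infer_instance

-- ===== CLAIM (what is proved, stated in full; the proofs are below) =====
def Claim_equal_rotate_grid_45 : Prop := ∀ (grid : List (List String)) (flip : Bool), Dom_rotate_grid_45 grid flip → Pre_rotate_grid_45 grid flip → Spec_rotate_grid_45 grid flip (rotate_grid_45 grid flip)

-- ===== LEMMAS AND PROOFS =====

def pvStepT (d : List (List Char)) (p : Nat × Char) : List (List Char) :=
  d.set p.1 (d.getD p.1 [] ++ [p.2])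

def pvStepF (d : PySem.Dict Int (List Char)) (p : Int × Char) : PySem.Dict Int (List Char) :=
  let d := if d.contains p.1 then d else d.insert p.1 []
  d.modify p.1 [] (fun l => l ++ [p.2])

lemma pvStepT_length (d : List (List Char)) (p : Nat × Char) :
    (pvStepT d p).length = d.length := by
  simp [pvStepT]

lemma pvStepT_getD (d : List (List Char)) (a : Nat) (c : Char) (k : Nat) (ha : a < d.length) :
    (pvStepT d (a, c)).getD k [] = d.getD k [] ++ (if a = k then [c] else []) := by
  simp only [pvStepT, List.getD_eq_getElem?_getD, List.getElem?_set]
  by_cases h : a = k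
  · subst h; simp [ha]
  · simp [h]

lemma pvFoldT_length (ps : List (Nat × Char)) (d : List (List Char)) :
    (ps.foldl pvStepT d).length = d.length := by
  induction ps generalizing d with
  | nil => rfl
  | cons p ps ih => simp [List.foldl_cons, ih, pvStepT_length]

lemma pvFoldT_getD (ps : List (Nat × Char)) (d : List (List Char)) (k : Nat)
    (hb : ∀ p ∈ ps, p.1 < d.length) :
    (ps.foldl pvStepT d).getD k [] =
      d.getD k [] ++ (ps.filter (fun p => p.1 == k)).map Prod.snd := by
  induction ps generalizing d with
  | nil => simp
  | cons p ps ih =>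
    obtain ⟨a, c⟩ := p
    rw [List.foldl_cons,
      ih _ (fun q hq => by
        simpa [pvStepT_length] using hb q (List.mem_cons_of_mem _ hq)),
      pvStepT_getD _ _ _ _ (by simpa using hb (a, c) (List.mem_cons_self))]
    by_cases h : a = k <;> simp [h]

lemma pvStepF_getD (d : PySem.Dict Int (List Char)) (a : Int) (c : Char) (k : Int) :
    (pvStepF d (a, c)).getD k [] = d.getD k [] ++ (if a = k then [c] else []) := by
  unfold pvStepF
  by_cases hc : d.contains a
  · simp only [hc, if_true, PySem.Dict.getD_modify]
    by_cases h : a = k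
    · subst h; simp
    · simp [h, Ne.symm h]
  · simp only [hc, if_false, Bool.false_eq_true, PySem.Dict.getD_modify]
    by_cases h : a = k
    · subst h
      simp [PySem.Dict.getD_insert_self, PySem.Dict.getD_of_not_contains _ _ (by simpa using hc)]
    · simp [h, Ne.symm h, PySem.Dict.getD_insert]

lemma pvFoldF_getD (ps : List (Int × Char)) (d : PySem.Dict Int (List Char)) (k : Int) :
    (ps.foldl pvStepF d).getD k [] =
      d.getD k [] ++ (ps.filter (fun p => p.1 == k)).map Prod.snd := by
  induction ps generalizing d with
  | nil => simp
  | cons p ps ih =>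
    obtain ⟨a, c⟩ := p
    rw [List.foldl_cons, ih, pvStepF_getD]
    by_cases h : a = k <;> simp [h]

lemma pvStepF_keys_mem (d : PySem.Dict Int (List Char)) (p : Int × Char) (k : Int) :
    k ∈ (pvStepF d p).keys ↔ k ∈ d.keys ∨ k = p.1 := by
  obtain ⟨a, c⟩ := p
  unfold pvStepF
  by_cases hc : d.contains a
  · rw [PySem.Dict.keys_modify]
    simp only [hc, if_true, PySem.Dict.mem_keys_insert]
    constructor
    · rintro (h | h) <;> [right; left] <;> assumption
    · rintro (h | h)
      · right; exact h
      · left; exact h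
  · rw [PySem.Dict.keys_modify]
    simp only [hc, if_false, Bool.false_eq_true, PySem.Dict.mem_keys_insert]
    tauto

lemma pvStepF_keys_nodup (d : PySem.Dict Int (List Char)) (p : Int × Char)
    (hd : d.keys.Nodup) : (pvStepF d p).keys.Nodup := by
  obtain ⟨a, c⟩ := p
  unfold pvStepF
  rw [PySem.Dict.keys_modify]
  by_cases hc : d.contains a
  · simp only [hc, if_true]
    exact PySem.Dict.nodup_keys_insert _ _ _ hd
  · simp only [hc, if_false, Bool.false_eq_true]
    exact PySem.Dict.nodup_keys_insert _ _ _ (PySem.Dict.nodup_keys_insert _ _ _ hd)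

lemma pvFoldF_keys_mem (ps : List (Int × Char)) (d : PySem.Dict Int (List Char)) (k : Int) :
    k ∈ (ps.foldl pvStepF d).keys ↔ k ∈ d.keys ∨ k ∈ ps.map Prod.fst := by
  induction ps generalizing d with
  | nil => simp
  | cons p ps ih =>
    rw [List.foldl_cons, ih, pvStepF_keys_mem]
    simp
    tauto

lemma pvFoldF_keys_nodup (ps : List (Int × Char)) (d : PySem.Dict Int (List Char))
    (hd : d.keys.Nodup) : (ps.foldl pvStepF d).keys.Nodup := by
  induction ps generalizing d with
  | nil => exact hd
  | cons p ps ih => exact ih _ (pvStepF_keys_nodup _ _ hd)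

lemma pvFilterRangeSingleton (n : Nat) (p : Nat → Bool) (j0 : Nat)
    (h : ∀ j, p j = true ↔ j = j0) :
    (List.range n).filter p = if j0 < n then [j0] else [] := by
  induction n with
  | zero => simp
  | succ n ih =>
    rw [List.range_succ, List.filter_append, ih]
    by_cases hn : n = j0
    · subst hn
      simp [h, List.filter_cons]
    · have : p n = false := by
        rcases Bool.eq_false_or_eq_true (p n) with ht | hf
        · exact absurd ((h n).mp ht) hn
        · exact hf
      rw [List.filter_cons]
      simp only [this]
      split_ifs <;> simp_all <;> omega

lemma pvFlatMapInterval {β : Type} (n a b : Nat) (h : Nat → β) :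
    ((List.range n).flatMap (fun i => if a ≤ i ∧ i < b then [h i] else [])) =
      (List.range' a (min b n - a)).map h := by
  induction n with
  | zero => simp
  | succ n ih =>
    rw [List.range_succ, List.flatMap_append, ih]
    by_cases hc : a ≤ n ∧ n < b
    · have h1 : min b (n + 1) - a = (min b n - a) + 1 := by omega
      have h2 : a + (min b n - a) = n := by omega
      rw [h1, List.range'_1_concat]
      simp [hc, h2]
    · have h1 : min b (n + 1) - a = min b n - a := by omega
      rw [h1]
      simp [hc]

lemma pvBranchT (g : List (List Char)) (rows cols : Nat) (hr : 1 ≤ rows) :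
    ((List.range rows).foldl (fun d (i : Nat) =>
        (List.range cols).foldl (fun d (j : Nat) =>
          d.set (i + j) (d.getD (i + j) [] ++ [(g.getD i []).getD j ' '])) d)
      (List.replicate (rows + cols - 1) [])).map String.ofList =
    (List.range (rows + cols - 1)).map (fun s =>
      String.ofList ((List.range' (s + 1 - cols) (min s (rows - 1) + 1 - (s + 1 - cols))).map
        (fun i => (g.getD i []).getD (s - i) ' '))) := by
  have h1 : ∀ (d : List (List Char)) (i : Nat),
      (List.range cols).foldl (fun d (j : Nat) =>
        d.set (i + j) (d.getD (i + j) [] ++ [(g.getD i []).getD j ' '])) d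
      = ((List.range cols).map (fun j => (i + j, (g.getD i []).getD j ' '))).foldl pvStepT d := by
    intro d i; rw [List.foldl_map]; rfl
  simp only [h1]
  rw [← List.foldl_flatMap]
  set ps : List (Nat × Char) :=
    (List.range rows).flatMap (fun i => (List.range cols).map (fun j => (i + j, (g.getD i []).getD j ' '))) with hps
  have hbound : ∀ p ∈ ps, p.1 < (List.replicate (rows + cols - 1) ([] : List Char)).length := by
    intro p hp
    simp only [hps, List.mem_flatMap, List.mem_map, List.mem_range] at hp
    obtain ⟨i, hi, j, hj, rfl⟩ := hp
    simp; omega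
  have hlen : (ps.foldl pvStepT (List.replicate (rows + cols - 1) [])).length = rows + cols - 1 := by
    rw [pvFoldT_length]; simp
  apply List.ext_getElem (by simp [hlen])
  intro k hk1 hk2
  simp only [List.getElem_map, List.getElem_range]
  congr 1
  have hkN : k < rows + cols - 1 := by simpa [hlen] using hk1
  have hget : (ps.foldl pvStepT (List.replicate (rows + cols - 1) []))[k]'(by simpa [hlen] using hkN)
      = (ps.foldl pvStepT (List.replicate (rows + cols - 1) [])).getD k [] := by
    rw [List.getD_eq_getElem?_getD, List.getElem?_eq_getElem]; rfl
  rw [hget, pvFoldT_getD _ _ _ hbound]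
  have hrep : (List.replicate (rows + cols - 1) ([] : List Char)).getD k [] = [] := by
    simp [List.getD_eq_getElem?_getD, List.getElem?_replicate]
    split <;> rfl
  rw [hrep, List.nil_append, hps, List.filter_flatMap, List.map_flatMap]
  have per_i : ∀ i : Nat,
      ((((List.range cols).map (fun j => (i + j, (g.getD i []).getD j ' '))).filter
          (fun p => p.1 == k)).map Prod.snd)
      = if k + 1 - cols ≤ i ∧ i < k + 1 then [(g.getD i []).getD (k - i) ' '] else [] := by
    intro i
    rw [List.filter_map]
    by_cases hik : i ≤ k
    · rw [pvFilterRangeSingleton cols _ (k - i) (fun j => by simp [beq_iff_eq]; omega)]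
      by_cases h2 : k - i < cols
      · rw [if_pos h2, if_pos (by omega)]
        simp
      · rw [if_neg h2, if_neg (by omega)]
        simp
    · rw [List.filter_eq_nil_iff.mpr ?_, if_neg (by omega)]
      · simp
      · intro j hj
        simp only [List.mem_range] at hj
        simp only [Function.comp_apply, beq_iff_eq]
        omega
  simp only [per_i]
  rw [pvFlatMapInterval rows (k + 1 - cols) (k + 1) (fun i => (g.getD i []).getD (k - i) ' ')]
  have hcnt : min (k + 1) rows - (k + 1 - cols) = min k (rows - 1) + 1 - (k + 1 - cols) := by omega
  rw [hcnt]

lemma pvBranchF (g : List (List Char)) (rows cols : Nat)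
    (dd : PySem.Dict Int (List Char)) (hr : 1 ≤ rows) (hc : 1 ≤ cols)
    (hdd : dd = (List.range rows).foldl (fun d (i : Nat) =>
        (List.range cols).foldl (fun d (j : Nat) =>
          let key : Int := (i : Int) - (j : Int)
          let d := if d.contains key then d else d.insert key []
          d.modify key [] (fun l => l ++ [(g.getD i []).getD j ' '])) d)
      PySem.Dict.empty) :
    ((PySem.List.sorted dd.keys (fun x => x) false).map (fun k => dd.getD k [])).map String.ofList =
    (PySem.List.pyRange (-((cols : Int) - 1)) (rows : Int) 1).map (fun k =>
      String.ofList ((List.range' (max 0 k).toNat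
          ((min ((rows : Int) - 1) (k + (cols : Int) - 1)).toNat + 1 - (max 0 k).toNat)).map
        (fun i => (g.getD i []).getD ((i : Int) - k).toNat ' '))) := by
  have hstep : (fun (d : PySem.Dict Int (List Char)) (i : Nat) =>
      (List.range cols).foldl (fun d (j : Nat) =>
        let key : Int := (i : Int) - (j : Int)
        let d := if d.contains key then d else d.insert key []
        d.modify key [] (fun l => l ++ [(g.getD i []).getD j ' '])) d)
      = fun d (i : Nat) => ((List.range cols).map
          (fun (j : Nat) => ((i : Int) - (j : Int), (g.getD i []).getD j ' '))).foldl pvStepF d := by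
    funext d i
    rw [List.foldl_map]
    rfl
  rw [hstep, ← List.foldl_flatMap] at hdd
  set ps : List (Int × Char) :=
    (List.range rows).flatMap (fun (i : Nat) => (List.range cols).map
      (fun (j : Nat) => ((i : Int) - (j : Int), (g.getD i []).getD j ' '))) with hps
  have hget : ∀ k : Int, dd.getD k [] = (ps.filter (fun p => p.1 == k)).map Prod.snd := by
    intro k
    rw [hdd, pvFoldF_getD]
    simp
  have hmem : ∀ k : Int, k ∈ dd.keys ↔ (-((cols : Int) - 1) ≤ k ∧ k < (rows : Int)) := by
    intro k
    rw [hdd, pvFoldF_keys_mem]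
    simp only [PySem.Dict.keys_empty, List.not_mem_nil, false_or]
    constructor
    · intro h
      rcases List.mem_map.mp h with ⟨p, hp, rfl⟩
      rcases List.mem_flatMap.mp hp with ⟨i, hi, hpi⟩
      rcases List.mem_map.mp hpi with ⟨j, hj, rfl⟩
      simp only [List.mem_range] at hi hj
      simp only
      omega
    · intro hb
      by_cases h0 : 0 ≤ k
      · refine List.mem_map.mpr ⟨_, List.mem_flatMap.mpr ⟨k.toNat, List.mem_range.mpr (by omega),
          List.mem_map.mpr ⟨0, List.mem_range.mpr (by omega), rfl⟩⟩, ?_⟩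
        simp
        omega
      · refine List.mem_map.mpr ⟨_, List.mem_flatMap.mpr ⟨0, List.mem_range.mpr (by omega),
          List.mem_map.mpr ⟨(-k).toNat, List.mem_range.mpr (by omega), rfl⟩⟩, ?_⟩
        simp
        omega
  have hsorted : PySem.List.sorted dd.keys (fun x => x) false
      = PySem.List.pyRange (-((cols : Int) - 1)) (rows : Int) 1 := by
    apply PySem.List.sorted_eq_of_perm_of_pairwise_lt
    · refine (List.perm_ext_iff_of_nodup (PySem.List.nodup_pyRange_one _ _) ?_).mpr ?_
      · rw [hdd]; exact pvFoldF_keys_nodup _ _ PySem.Dict.nodup_keys_empty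
      · intro a
        rw [PySem.List.mem_pyRange_one, hmem]
    · exact PySem.List.pairwise_lt_pyRange_one _ _
  rw [hsorted, List.map_map]
  apply List.map_congr_left
  intro k hk
  have hkb : -((cols : Int) - 1) ≤ k ∧ k < (rows : Int) := PySem.List.mem_pyRange_one.mp hk
  simp only [Function.comp_apply]
  congr 1
  rw [hget, hps, List.filter_flatMap, List.map_flatMap]
  have per_i : ∀ i : Nat,
      ((((List.range cols).map (fun (j : Nat) => ((i : Int) - (j : Int), (g.getD i []).getD j ' '))).filter
          (fun p => p.1 == k)).map Prod.snd)
      = if (max 0 k).toNat ≤ i ∧ i < (k + (cols : Int)).toNat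
          then [(g.getD i []).getD ((i : Int) - k).toNat ' '] else [] := by
    intro i
    rw [List.filter_map]
    by_cases hik : k ≤ (i : Int)
    · rw [pvFilterRangeSingleton cols _ (((i : Int) - k).toNat)
        (fun j => by simp only [Function.comp_apply, beq_iff_eq]; omega)]
      by_cases h2 : ((i : Int) - k).toNat < cols
      · rw [if_pos h2, if_pos (by omega)]
        simp
      · rw [if_neg h2, if_neg (by omega)]
        simp
    · rw [List.filter_eq_nil_iff.mpr ?_, if_neg (by omega)]
      · simp
      · intro j hj
        simp only [List.mem_range] at hj
        simp only [Function.comp_apply, beq_iff_eq]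
        omega
  simp only [per_i]
  rw [pvFlatMapInterval rows ((max 0 k).toNat) ((k + (cols : Int)).toNat)
    (fun i => (g.getD i []).getD ((i : Int) - k).toNat ' ')]
  have hcnt : min ((k + (cols : Int)).toNat) rows - (max 0 k).toNat
      = (min ((rows : Int) - 1) (k + (cols : Int) - 1)).toNat + 1 - (max 0 k).toNat := by
    omega
  rw [hcnt]

lemma pvBranchF0 (g : List (List Char)) (rows cols : Nat)
    (dd : PySem.Dict Int (List Char)) (hr : rows = 1) (hc : cols = 0)
    (hdd : dd = (List.range rows).foldl (fun d (i : Nat) =>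
        (List.range cols).foldl (fun d (j : Nat) =>
          let key : Int := (i : Int) - (j : Int)
          let d := if d.contains key then d else d.insert key []
          d.modify key [] (fun l => l ++ [(g.getD i []).getD j ' '])) d)
      PySem.Dict.empty) :
    ((PySem.List.sorted dd.keys (fun x => x) false).map (fun k => dd.getD k [])).map String.ofList =
    (PySem.List.pyRange (-((cols : Int) - 1)) (rows : Int) 1).map (fun k =>
      String.ofList ((List.range' (max 0 k).toNat
          ((min ((rows : Int) - 1) (k + (cols : Int) - 1)).toNat + 1 - (max 0 k).toNat)).map
        (fun i => (g.getD i []).getD ((i : Int) - k).toNat ' '))) := by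
  subst hr hc
  have hdd0 : dd = PySem.Dict.empty := by rw [hdd]; rfl
  rw [hdd0]
  rw [show PySem.List.pyRange (-(((0 : Nat) : Int) - 1)) ((1 : Nat) : Int) 1 = []
    from PySem.List.pyRange_one_eq_nil (by norm_num)]
  rfl

-- ===== VERDICT (by name: the statement is the Claim_ definition above) =====
theorem rotate_grid_45_spec : Claim_equal_rotate_grid_45 := by
  unfold Claim_equal_rotate_grid_45
  intro grid flip _ hpre
  obtain ⟨h1, h2, _, h4⟩ := hpre
  unfold Spec_rotate_grid_45 rotate_grid_45 rotate_grid_45_alt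
  rcases grid with _ | ⟨r, t⟩
  · exact absurd rfl h1
  rcases r with _ | ⟨s0, r'⟩
  · exact absurd rfl (h2 _ (by simp))
  cases flip
  · by_cases hc : 1 ≤ s0.toList.length
    · exact pvBranchF _ _ _ _ (by simp) (by simpa using hc) rfl
    · have hrow : ((s0 :: r') :: t).length ≤ 1 := (h4 rfl).resolve_left (by simpa using hc)
      rcases t with _ | ⟨r2, t2⟩
      · have hc0 : s0.toList.length = 0 := by omega
        exact pvBranchF0 _ _ _ _ (by simp) (by simpa using hc0) rfl
      · simp at hrow
  · exact pvBranchT _ _ _ (by simp)
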